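-- pv_equiv track=rewrite | github.com/chetwerikoff/ai-orchestrator | tests/test_orchestrator_validation.py | implementer_produced_paths
-- ===== SOURCE A (Python) =====
-- def _paths_from_porcelain_line(line: str) -> list[str]:
--     """Normalize paths from one `git status --porcelain` line."""
--     stripped = line.rstrip()
--     if len(stripped) < 4:
--         return []
--     rest = stripped[3:].strip()
--     if " -> " in rest:
--         parts = rest.split(" -> ")
--         return [p.strip().replace("\\", "/") for p in parts]
--     return [rest.replace("\\", "/")]
--
-- def _path_to_line_map(lines: list[str]) -> dict[str, str]:
--     mapping: dict[str, str] = {}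
--     for line in lines:
--         if not line.strip():
--             continue
--         trimmed = line.rstrip()
--         for path in _paths_from_porcelain_line(trimmed):
--             mapping[path] = trimmed
--     return mapping
--
-- def implementer_produced_paths(before_lines: list[str], after_lines: list[str]) -> set[str]:
--     """Paths whose porcelain line differs between snapshots (legacy line-level delta)."""
--     before_map = _path_to_line_map(before_lines)
--     after_map = _path_to_line_map(after_lines)
--     changed: set[str] = set()
--     for path in set(before_map) | set(after_map):
--         b_line = before_map.get(path)
--         a_line = after_map.get(path)
--         missing_diff = (b_line is None) != (a_line is None)
--         content_diff = b_line is not None and a_line is not None and b_line != a_line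
--         if missing_diff or content_diff:
--             changed.add(path)
--     return changed
-- ===== SOURCE B (Python) =====
-- def _paths_from_porcelain_line(line: str) -> list[str]:
--     """Normalize paths from one `git status --porcelain` line."""
--     stripped = line.rstrip()
--     if len(stripped) < 4:
--         return []
--     rest = stripped[3:].strip()
--     if " -> " in rest:
--         parts = rest.split(" -> ")
--         return [p.strip().replace("\\", "/") for p in parts]
--     return [rest.replace("\\", "/")]
--
-- def _last_line_for(path: str, lines: list[str]) -> str | None:
--     """Last porcelain line in `lines` that mentions `path` (trimmed), or None."""
--     result = None
--     for line in lines: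
--         if not line.strip():
--             continue
--         trimmed = line.rstrip()
--         if path in _paths_from_porcelain_line(trimmed):
--             result = trimmed
--     return result
--
-- def _collect_paths(lines: list[str], acc: list[str]) -> list[str]:
--     """Append to acc, in first-occurrence order, every path the lines mention."""
--     for line in lines:
--         if not line.strip():
--             continue
--         for p in _paths_from_porcelain_line(line.rstrip()):
--             if p not in acc:
--                 acc.append(p)
--     return acc
--
-- def implementer_produced_paths(before_lines: list[str], after_lines: list[str]) -> set[str]:
--     """Paths whose porcelain line differs between snapshots (legacy line-level delta)."""
--     candidates = _collect_paths(after_lines, _collect_paths(before_lines, []))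
--     return {p for p in candidates
--             if _last_line_for(p, before_lines) != _last_line_for(p, after_lines)}
-- ===== Notes on version B (the rewrite author's own statement) =====
-- stated objective: alternative
-- what changed: Drops A's path->line dictionaries entirely: B collects candidate paths in first-occurrence order and, for each candidate, rescans each snapshot directly for the last porcelain line mentioning it, reporting the path when the two last lines differ (None included); this trades A's hash maps for per-path backward-resolution scans.
import Mathlib
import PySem

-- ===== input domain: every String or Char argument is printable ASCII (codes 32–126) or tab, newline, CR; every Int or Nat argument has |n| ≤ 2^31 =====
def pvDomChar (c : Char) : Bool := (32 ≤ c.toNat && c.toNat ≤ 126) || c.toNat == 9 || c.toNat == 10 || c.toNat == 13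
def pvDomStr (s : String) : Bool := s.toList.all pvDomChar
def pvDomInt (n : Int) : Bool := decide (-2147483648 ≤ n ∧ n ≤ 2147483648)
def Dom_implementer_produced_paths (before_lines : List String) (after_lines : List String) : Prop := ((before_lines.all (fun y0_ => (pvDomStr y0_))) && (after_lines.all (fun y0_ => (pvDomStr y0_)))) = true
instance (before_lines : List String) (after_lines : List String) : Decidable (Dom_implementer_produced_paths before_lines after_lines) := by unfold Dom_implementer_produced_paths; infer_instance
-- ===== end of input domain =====

-- B drops A's path->line dictionaries: it collects candidate paths in
-- first-occurrence order and rescans each snapshot per path for the last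
-- porcelain line mentioning it (objective: alternative; not faster).
-- Python set iteration order is unspecified; both ports use PySem.Set's
-- deterministic first-insertion order for every set.

-- ===== PORT A =====
-- _paths_from_porcelain_line (shared helper of both Pythons)
def pvPathsFromLine (line : String) : List String :=
  let stripped := PySem.Str.rstrip line
  if PySem.Str.len stripped < 4 then []
  else
    let rest := PySem.Str.strip (PySem.Str.slice stripped (some 3) none)
    if PySem.Str.isIn " -> " rest then
      -- rest.split(" -> "): the separator is a nonempty literal, so split? is always some
      ((PySem.Str.split? rest " -> ").getD []).map
        (fun p => PySem.Str.replace (PySem.Str.strip p) "\\" "/")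
    else [PySem.Str.replace rest "\\" "/"]

-- _path_to_line_map
def pvPathToLineMap (lines : List String) : PySem.Dict String String :=
  lines.foldl
    (fun mapping line =>
      if PySem.Str.strip line = "" then mapping
      else
        let trimmed := PySem.Str.rstrip line
        (pvPathsFromLine trimmed).foldl (fun m path => m.insert path trimmed) mapping)
    PySem.Dict.empty

def implementer_produced_paths (before_lines : List String) (after_lines : List String) : List String :=
  let before_map := pvPathToLineMap before_lines
  let after_map := pvPathToLineMap after_lines
  (PySem.Set.union (PySem.Set.ofList before_map.keys) (PySem.Set.ofList after_map.keys)).foldl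
    (fun changed path =>
      let b_line := before_map.get? path
      let a_line := after_map.get? path
      let missing_diff := b_line.isNone != a_line.isNone
      let content_diff := b_line.isSome && a_line.isSome && b_line != a_line
      if missing_diff || content_diff then PySem.Set.add changed path else changed)
    PySem.Set.empty

-- ===== PORT B =====
-- _last_line_for
def pvLastLineFor (path : String) (lines : List String) : Option String :=
  lines.foldl
    (fun result line =>
      if PySem.Str.strip line = "" then result
      else
        let trimmed := PySem.Str.rstrip line
        if path ∈ pvPathsFromLine trimmed then some trimmed else result)
    none

-- _collect_paths ('if p not in acc: acc.append(p)' is PySem.Set.add)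
def pvCollectPaths (lines : List String) (acc : List String) : List String :=
  lines.foldl
    (fun acc line =>
      if PySem.Str.strip line = "" then acc
      else (pvPathsFromLine (PySem.Str.rstrip line)).foldl PySem.Set.add acc)
    acc

def implementer_produced_paths_alt (before_lines : List String) (after_lines : List String) : List String :=
  let candidates := pvCollectPaths after_lines (pvCollectPaths before_lines [])
  candidates.foldl
    (fun out p =>
      if pvLastLineFor p before_lines != pvLastLineFor p after_lines
      then PySem.Set.add out p else out)
    PySem.Set.empty

-- ===== PRECONDITION & SPEC =====
def Spec_implementer_produced_paths (before_lines : List String) (after_lines : List String) (out : List String) : Prop := out = implementer_produced_paths_alt before_lines after_lines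
instance (before_lines : List String) (after_lines : List String) (out : List String) : Decidable (Spec_implementer_produced_paths before_lines after_lines out) := by unfold Spec_implementer_produced_paths; infer_instance

-- ===== CLAIM (what is proved, stated in full; the proofs are below) =====
def Claim_equal_implementer_produced_paths : Prop := ∀ (before_lines : List String) (after_lines : List String), Dom_implementer_produced_paths before_lines after_lines → Spec_implementer_produced_paths before_lines after_lines (implementer_produced_paths before_lines after_lines)

-- ===== LEMMAS AND PROOFS =====

-- the flat stream of paths the lines mention, in order
def pvStream (lines : List String) : List String :=
  lines.flatMap (fun line =>
    if PySem.Str.strip line = "" then []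
    else pvPathsFromLine (PySem.Str.rstrip line))

-- keys of A's dict = first occurrences of the path stream
theorem pvKeysAux (lines : List String) :
    ∀ d : PySem.Dict String String,
      (lines.foldl
        (fun mapping line =>
          if PySem.Str.strip line = "" then mapping
          else
            let trimmed := PySem.Str.rstrip line
            (pvPathsFromLine trimmed).foldl (fun m path => m.insert path trimmed) mapping)
        d).keys = PySem.Set.update d.keys (pvStream lines) := by
  induction lines with
  | nil => intro d; simp [pvStream, PySem.Set.update]
  | cons l ls ih =>
    intro d
    rw [List.foldl_cons]
    show _ = PySem.Set.update d.keys (pvStream (l :: ls))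
    have hs : pvStream (l :: ls)
        = (if PySem.Str.strip l = "" then [] else pvPathsFromLine (PySem.Str.rstrip l))
          ++ pvStream ls := by
      simp [pvStream]
    rw [hs, PySem.Set.update_append]
    by_cases h : PySem.Str.strip l = ""
    · rw [if_pos h, if_pos h, ih d]
      rfl
    · rw [if_neg h, if_neg h, ih]
      rw [PySem.Dict.keys_foldl_insert]

theorem pvKeys (lines : List String) :
    (pvPathToLineMap lines).keys = PySem.Set.ofList (pvStream lines) := by
  rw [pvPathToLineMap, pvKeysAux]
  rfl

-- lookups after a block of inserts with the same value
theorem pvGetFoldlInsert (p t : String) (ps : List String) :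
    ∀ d : PySem.Dict String String,
      (ps.foldl (fun m path => m.insert path t) d).get? p
        = if p ∈ ps then some t else d.get? p := by
  induction ps with
  | nil => intro d; simp
  | cons q ps ih =>
    intro d
    rw [List.foldl_cons, ih]
    by_cases hq : p = q
    · subst hq
      simp [PySem.Dict.get?_insert_self]
    · by_cases hm : p ∈ ps <;> simp [PySem.Dict.get?_insert, hq, hm]

-- A's dict lookup = B's direct last-line scan
theorem pvGetAux (p : String) (lines : List String) :
    ∀ d : PySem.Dict String String,
      (lines.foldl
        (fun mapping line =>
          if PySem.Str.strip line = "" then mapping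
          else
            let trimmed := PySem.Str.rstrip line
            (pvPathsFromLine trimmed).foldl (fun m path => m.insert path trimmed) mapping)
        d).get? p
      = lines.foldl
          (fun result line =>
            if PySem.Str.strip line = "" then result
            else
              let trimmed := PySem.Str.rstrip line
              if p ∈ pvPathsFromLine trimmed then some trimmed else result)
          (d.get? p) := by
  induction lines with
  | nil => intro d; rfl
  | cons l ls ih =>
    intro d
    rw [List.foldl_cons, List.foldl_cons]
    by_cases h : PySem.Str.strip l = ""
    · rw [if_pos h, if_pos h, ih d]
    · rw [if_neg h, if_neg h, ih, pvGetFoldlInsert]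

theorem pvGet (p : String) (lines : List String) :
    (pvPathToLineMap lines).get? p = pvLastLineFor p lines := by
  rw [pvPathToLineMap, pvGetAux, pvLastLineFor, PySem.Dict.get?_empty]

-- B's candidate collection is Set.update with the stream
theorem pvCollect (lines : List String) :
    ∀ acc : List String, pvCollectPaths lines acc = PySem.Set.update acc (pvStream lines) := by
  induction lines with
  | nil => intro acc; simp [pvCollectPaths, pvStream, PySem.Set.update]
  | cons l ls ih =>
    intro acc
    have hs : pvStream (l :: ls)
        = (if PySem.Str.strip l = "" then [] else pvPathsFromLine (PySem.Str.rstrip l))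
          ++ pvStream ls := by simp [pvStream]
    rw [pvCollectPaths, List.foldl_cons, hs, PySem.Set.update_append]
    by_cases h : PySem.Str.strip l = ""
    · rw [if_pos h, if_pos h]
      exact ih acc
    · rw [if_neg h, if_neg h]
      exact ih _

-- updating by a deduplicated list is updating by the list
theorem pvUpdateOfList {α : Type} [BEq α] [LawfulBEq α] (s : List α) (xs : List α) :
    PySem.Set.update s (PySem.Set.ofList xs) = PySem.Set.update s xs := by
  rw [PySem.Set.update_eq_append_filter, PySem.Set.update_eq_append_filter,
    PySem.Set.ofList_ofList]

theorem pvAddNotMem {α : Type} [BEq α] [LawfulBEq α] {s : List α} {x : α} (h : x ∉ s) :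
    PySem.Set.add s x = s ++ [x] := PySem.Set.add_of_not_mem h

-- conditional-add loop over a nodup list disjoint from the accumulator = filter
theorem pvFoldlAddIf {α : Type} [BEq α] [LawfulBEq α] (p : α → Bool) (u : List α) :
    ∀ (acc : List α), u.Nodup → (∀ x ∈ u, x ∉ acc) →
      u.foldl (fun s x => if p x then PySem.Set.add s x else s) acc = acc ++ u.filter p := by
  induction u with
  | nil => intro acc _ _; simp
  | cons x u ih =>
    intro acc hn hd
    rw [List.nodup_cons] at hn
    obtain ⟨hx, hu⟩ := hn
    rw [List.foldl_cons, List.filter_cons]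
    by_cases hp : p x = true
    · rw [if_pos hp, if_pos hp, pvAddNotMem (hd x (by simp))]
      rw [ih (acc ++ [x]) hu ?_]
      · simp
      · intro y hy
        have hyx : y ≠ x := fun h => hx (h ▸ hy)
        simp [hyx]
        exact hd y (by simp [hy])
    · rw [if_neg hp, if_neg hp]
      exact ih acc hu (fun y hy => hd y (by simp [hy]))

-- the per-path condition of A is plain inequality of the two lookups
theorem pvCond (b a : Option String) :
    ((b.isNone != a.isNone) || (b.isSome && a.isSome && b != a)) = (b != a) := by
  cases b <;> cases a <;> simp [bne]

-- ===== VERDICT (by name: the statement is the Claim_ definition above) =====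
theorem implementer_produced_paths_spec : Claim_equal_implementer_produced_paths := by
  intro before_lines after_lines _
  unfold Spec_implementer_produced_paths implementer_produced_paths implementer_produced_paths_alt
  dsimp only
  -- the common iteration list
  have hL : PySem.Set.union (PySem.Set.ofList (pvPathToLineMap before_lines).keys)
        (PySem.Set.ofList (pvPathToLineMap after_lines).keys)
      = pvCollectPaths after_lines (pvCollectPaths before_lines []) := by
    rw [pvKeys, pvKeys, PySem.Set.ofList_ofList, PySem.Set.ofList_ofList]
    show PySem.Set.update _ _ = _
    rw [pvUpdateOfList, pvCollect, pvCollect]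
    rfl
  rw [hL]
  set L := pvCollectPaths after_lines (pvCollectPaths before_lines []) with hLdef
  have hNodup : L.Nodup := by
    rw [hLdef, pvCollect, pvCollect]
    apply PySem.Set.nodup_update
    apply PySem.Set.nodup_update
    exact List.nodup_nil
  have hA := pvFoldlAddIf
    (fun path => (((pvPathToLineMap before_lines).get? path).isNone
        != ((pvPathToLineMap after_lines).get? path).isNone)
      || (((pvPathToLineMap before_lines).get? path).isSome
        && ((pvPathToLineMap after_lines).get? path).isSome
        && ((pvPathToLineMap before_lines).get? path != (pvPathToLineMap after_lines).get? path)))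
    L PySem.Set.empty hNodup (by intro x _ h; simp [PySem.Set.empty] at h)
  have hB := pvFoldlAddIf
    (fun p => pvLastLineFor p before_lines != pvLastLineFor p after_lines)
    L PySem.Set.empty hNodup (by intro x _ h; simp [PySem.Set.empty] at h)
  rw [show (PySem.Set.empty : List String) = [] from rfl] at hA hB
  rw [List.nil_append] at hA hB
  refine hA.trans (Eq.trans ?_ hB.symm)
  congr 1
  funext p
  beta_reduce
  rw [pvCond, pvGet, pvGet]
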